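-- pv_equiv track=rewrite | github.com/ZoeBerling/ZoeBcomp3006repository2021 | CAH_LSTM/LSTMCAH.py | token_sequence_list
-- ===== SOURCE A (Python) =====
-- def token_sequence_list(d, card_list):
--     input_sequences = []
--     for lst in card_list:   # create a sequence of indices increasing length
--         for w in range(1, len(lst)):
--             n_gram_index_sequence = lst[:w+1]
--             for i, word in enumerate(n_gram_index_sequence): # change to index
--                 if word in d:
--                     n_gram_index_sequence[i] = d.index(word) # return sequence of tokens
--
--             input_sequences.append(n_gram_index_sequence)
--     return input_sequences
-- ===== SOURCE B (Python) =====
-- def token_sequence_list(d, card_list):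
--     # Build a first-occurrence index once, then one incremental pass per list.
--     pos = {}
--     for i, word in enumerate(d):
--         if word not in pos:
--             pos[word] = i
--     input_sequences = []
--     for lst in card_list:
--         prefix = []
--         for word in lst:
--             prefix = prefix + [pos.get(word, word)]
--             if len(prefix) >= 2:
--                 input_sequences.append(prefix)
--     return input_sequences
-- ===== Notes on version B (the rewrite author's own statement) =====
-- stated objective: faster
-- what changed: B builds a first-occurrence index dictionary for d once and makes a single incremental pass per card list, extending a running tokenized prefix and appending each prefix of length >= 2, instead of A's triple nesting that re-slices and re-tokenizes every prefix with a linear d.index scan per word.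
import Mathlib
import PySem

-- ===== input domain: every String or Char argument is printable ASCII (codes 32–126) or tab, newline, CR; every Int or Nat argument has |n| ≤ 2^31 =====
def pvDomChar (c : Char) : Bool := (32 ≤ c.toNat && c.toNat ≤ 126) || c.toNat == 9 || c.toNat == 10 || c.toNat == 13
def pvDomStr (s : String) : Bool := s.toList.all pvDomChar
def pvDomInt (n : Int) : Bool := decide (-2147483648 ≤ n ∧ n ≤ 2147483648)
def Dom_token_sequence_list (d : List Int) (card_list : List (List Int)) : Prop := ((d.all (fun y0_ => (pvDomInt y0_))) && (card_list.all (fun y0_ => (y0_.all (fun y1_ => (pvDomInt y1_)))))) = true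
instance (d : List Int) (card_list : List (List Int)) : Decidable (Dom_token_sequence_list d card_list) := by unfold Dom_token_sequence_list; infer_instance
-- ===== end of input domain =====

-- B replaces A's slice-then-retokenize triple nesting (with a linear d.index scan per word)
-- by a first-occurrence index dictionary for d built once and one incremental prefix pass per list.

-- ===== PORT A =====
def token_sequence_list (d : List Int) (card_list : List (List Int)) : List (List Int) :=
  card_list.foldl (fun input_sequences lst =>
    (PySem.List.pyRange 1 (lst.length : Int) 1).foldl (fun acc w =>
      let ng := PySem.List.slice lst (some 0) (some (w + 1))
      let ng' := (PySem.List.enumerate ng 0).foldl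
        (fun cur iw =>
          if d.contains iw.2 then
            PySem.List.pySetD cur iw.1 (((PySem.List.index? d iw.2).getD 0 : Nat) : Int)
          else cur) ng
      acc ++ [ng']) input_sequences) []

-- ===== PORT B =====
def token_sequence_list_alt (d : List Int) (card_list : List (List Int)) : List (List Int) :=
  let pos : PySem.Dict Int Int :=
    (PySem.List.enumerate d 0).foldl
      (fun m iw => if m.contains iw.2 = false then m.insert iw.2 iw.1 else m)
      PySem.Dict.empty
  card_list.foldl
    (fun input_sequences lst =>
      (lst.foldl
        (fun st word =>
          let p := st.1 ++ [pos.getD word word]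
          (p, if 2 ≤ p.length then st.2 ++ [p] else st.2))
        (([] : List Int), input_sequences)).2)
    []

-- ===== PRECONDITION & SPEC =====
def Spec_token_sequence_list (d : List Int) (card_list : List (List Int)) (out : List (List Int)) : Prop := out = token_sequence_list_alt d card_list
instance (d : List Int) (card_list : List (List Int)) (out : List (List Int)) : Decidable (Spec_token_sequence_list d card_list out) := by unfold Spec_token_sequence_list; infer_instance

-- ===== CLAIM (what is proved, stated in full; the proofs are below) =====
def Claim_equal_token_sequence_list : Prop := ∀ (d : List Int) (card_list : List (List Int)), Dom_token_sequence_list d card_list → Spec_token_sequence_list d card_list (token_sequence_list d card_list)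

-- ===== LEMMAS AND PROOFS =====

-- The per-word tokenization both programs compute: first index in d if present, else the word itself.
def pvTok (d : List Int) (word : Int) : Int :=
  if d.contains word then (((PySem.List.index? d word).getD 0 : Nat) : Int) else word

-- What B's inner loop accumulates after a (tokenized) prefix `pre`.
def pvGather (g : Int → Int) : List Int → List Int → List (List Int)
  | _, [] => []
  | pre, x :: xs =>
      (if 2 ≤ pre.length + 1 then [pre ++ [g x]] else []) ++ pvGather g (pre ++ [g x]) xs

-- The common per-list contribution: all tokenized prefixes of length 2 .. lst.length.
def pvContrib (h : Int → Int) (lst : List Int) : List (List Int) :=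
  match lst with
  | [] => []
  | _ :: xs => (List.range xs.length).map (fun k => (lst.map h).take (k + 2))

-- B's dictionary lookup agrees with pvTok.
lemma pvPos_getD (d : List Int) :
    ∀ (s : Int) (m : PySem.Dict Int Int) (word : Int),
    ((PySem.List.enumerate d s).foldl
      (fun m iw => if m.contains iw.2 = false then m.insert iw.2 iw.1 else m) m).getD word word
    = if m.contains word then m.getD word word
      else match PySem.List.index? d word with
           | some k => s + (k : Int)
           | none => word := by
  induction d with
  | nil =>
      intro s m word
      by_cases hc : m.contains word = true
      · simp [PySem.List.enumerate_nil, hc]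
      · simp only [PySem.List.enumerate_nil, List.foldl_nil]
        rw [if_neg hc, PySem.Dict.getD_of_not_contains m word (by simpa using hc)]
        simp [PySem.List.index?]
  | cons x xs ih =>
      intro s m word
      rw [PySem.List.enumerate_cons]
      simp only [List.foldl_cons]
      by_cases hc : m.contains x = true
      · rw [if_neg (by simp [hc])]
        rw [ih (s + 1) m word]
        by_cases hw : m.contains word = true
        · simp [hw]
        · rw [if_neg hw, if_neg hw]
          have hne : x ≠ word := by
            intro h; rw [h] at hc; exact hw hc
          rw [PySem.List.index?_cons_of_ne xs hne]
          cases PySem.List.index? xs word with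
          | none => simp
          | some k => simp only [Option.map_some]; push_cast; ring
      · rw [if_pos (by simp [hc])]
        rw [ih (s + 1) (m.insert x s) word]
        by_cases hxw : word = x
        · subst hxw
          rw [if_pos (PySem.Dict.contains_insert_self m word s)]
          rw [PySem.Dict.getD_insert_self]
          rw [if_neg (by simp [hc]), PySem.List.index?_cons_self]
          simp
        · have hcont : (m.insert x s).contains word = m.contains word := by
            rw [PySem.Dict.contains_insert]
            simp [show (word == x) = false from by simp [hxw]]
          rw [hcont]
          by_cases hw : m.contains word = true
          · rw [if_pos hw, if_pos hw, PySem.Dict.getD_insert_of_ne m s word hxw]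
          · rw [if_neg hw, if_neg hw]
            rw [PySem.List.index?_cons_of_ne xs (fun h => hxw h.symm)]
            cases PySem.List.index? xs word with
            | none => simp
            | some k => simp only [Option.map_some]; push_cast; ring

-- B's dictionary built from d, looked up with default, is exactly pvTok.
lemma pvPos_tok (d : List Int) (word : Int) :
    ((PySem.List.enumerate d 0).foldl
      (fun m iw => if m.contains iw.2 = false then m.insert iw.2 iw.1 else m)
      PySem.Dict.empty).getD word word = pvTok d word := by
  rw [pvPos_getD d 0 PySem.Dict.empty word]
  rw [if_neg (by simp [PySem.Dict.contains_empty])]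
  unfold pvTok
  by_cases hc : d.contains word = true
  · rw [if_pos hc]
    have hmem : word ∈ d := by simpa using hc
    cases hidx : PySem.List.index? d word with
    | none => exact absurd ((PySem.List.index?_eq_none_iff d word).mp hidx) (by simp [hmem])
    | some k => simp
  · rw [if_neg hc]
    rw [(PySem.List.index?_eq_none_iff d word).mpr (by simpa using hc)]

-- A's in-place retokenization loop maps pvTok over the list.
lemma pvTokA_eq (d : List Int) :
    ∀ (t pre : List Int),
    (PySem.List.enumerate t (pre.length : Int)).foldl
      (fun cur iw =>
        if d.contains iw.2 then
          PySem.List.pySetD cur iw.1 (((PySem.List.index? d iw.2).getD 0 : Nat) : Int)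
        else cur)
      (pre ++ t)
    = pre ++ t.map (pvTok d) := by
  intro t
  induction t with
  | nil => intro pre; simp [PySem.List.enumerate_nil]
  | cons x xs ih =>
      intro pre
      rw [PySem.List.enumerate_cons]
      simp only [List.foldl_cons]
      by_cases hc : d.contains x = true
      · rw [if_pos hc]
        have hset : PySem.List.pySetD (pre ++ x :: xs) ((pre.length : Nat) : Int)
            (((PySem.List.index? d x).getD 0 : Nat) : Int)
            = pre ++ (((PySem.List.index? d x).getD 0 : Nat) : Int) :: xs := by
          rw [PySem.List.pySetD_natCast]
          rw [List.set_append]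
          simp
        rw [hset]
        have h1 : pre ++ (((PySem.List.index? d x).getD 0 : Nat) : Int) :: xs
            = (pre ++ [(((PySem.List.index? d x).getD 0 : Nat) : Int)]) ++ xs := by simp
        have h2 : ((pre.length : Int) + 1)
            = (((pre ++ [(((PySem.List.index? d x).getD 0 : Nat) : Int)]).length : Nat) : Int) := by
          simp
        rw [h1, h2, ih]
        have hx : pvTok d x = (((PySem.List.index? d x).getD 0 : Nat) : Int) := by
          unfold pvTok; rw [if_pos hc]
        rw [List.map_cons, hx]
        simp
      · rw [if_neg hc]
        have h1 : pre ++ x :: xs = (pre ++ [x]) ++ xs := by simp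
        have h2 : ((pre.length : Int) + 1) = (((pre ++ [x]).length : Nat) : Int) := by simp
        rw [h1, h2, ih]
        have hx : pvTok d x = x := by unfold pvTok; rw [if_neg hc]
        rw [List.map_cons, hx]
        simp

-- B's inner fold, characterized.
lemma pvBfold (g : Int → Int) :
    ∀ (lst pre : List Int) (acc : List (List Int)),
    (lst.foldl
      (fun st word =>
        let p := st.1 ++ [g word]
        (p, if 2 ≤ p.length then st.2 ++ [p] else st.2))
      (pre, acc))
    = (pre ++ lst.map g, acc ++ pvGather g pre lst) := by
  intro lst
  induction lst with
  | nil => intro pre acc; simp [pvGather]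
  | cons x xs ih =>
      intro pre acc
      simp only [List.foldl_cons]
      rw [ih]
      simp only [pvGather]
      by_cases h : 2 ≤ pre.length + 1
      · simp [h, List.length_append]
      · simp [h, List.length_append]

lemma pvGather_pos (g : Int → Int) :
    ∀ (lst pre : List Int), 1 ≤ pre.length →
    pvGather g pre lst = (List.range lst.length).map (fun k => pre ++ (lst.map g).take (k + 1)) := by
  intro lst
  induction lst with
  | nil => intro pre _; simp [pvGather]
  | cons x xs ih =>
      intro pre hpre
      simp only [pvGather]
      rw [if_pos (by omega)]
      rw [ih (pre ++ [g x]) (by simp)]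
      rw [List.length_cons, List.range_succ_eq_map, List.map_cons, List.map_map,
        List.singleton_append]
      congr 1
      apply List.map_congr_left
      intro k _
      simp [Function.comp, Nat.succ_eq_add_one, List.take_succ_cons]

lemma pvGather_nil (g : Int → Int) (lst : List Int) :
    pvGather g [] lst = pvContrib g lst := by
  cases lst with
  | nil => simp [pvGather, pvContrib]
  | cons x xs =>
      simp only [pvGather, pvContrib, List.nil_append]
      rw [if_neg (by simp)]
      rw [pvGather_pos g xs [g x] (by simp)]
      simp only [List.nil_append, List.map_cons]
      apply List.map_congr_left
      intro k hk
      simp [List.take_succ_cons]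

lemma pvContrib_congr (h1 h2 : Int → Int) (lst : List Int)
    (hp : ∀ w ∈ lst, h1 w = h2 w) : pvContrib h1 lst = pvContrib h2 lst := by
  cases lst with
  | nil => rfl
  | cons x xs =>
      simp only [pvContrib]
      apply List.map_congr_left
      intro k _
      rw [List.map_congr_left hp]

-- A's per-list contribution, characterized.
lemma pvA_contrib (d : List Int) (lst : List Int) :
    (PySem.List.pyRange 1 (lst.length : Int) 1).map
      (fun w => ((PySem.List.slice lst (some 0) (some (w + 1))).map (pvTok d)))
    = pvContrib (pvTok d) lst := by
  cases lst with
  | nil => simp [pvContrib, PySem.List.pyRange_one_eq_nil]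
  | cons x xs =>
      rw [PySem.List.pyRange_one]
      have hlen : (((x :: xs).length : Int) - 1).toNat = xs.length := by simp
      rw [hlen]
      simp only [pvContrib, List.map_map]
      apply List.map_congr_left
      intro k hk
      simp only [Function.comp]
      rw [PySem.List.slice_zero_start, PySem.List.slice_to _ (by omega)]
      have h2 : ((1 : Int) + (k : Int) + 1).toNat = k + 2 := by omega
      rw [h2, List.map_take]

-- A equals the canonical fold.
lemma pvA_eq (d : List Int) (card_list : List (List Int)) :
    token_sequence_list d card_list
    = card_list.foldl (fun acc lst => acc ++ pvContrib (pvTok d) lst) [] := by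
  unfold token_sequence_list
  congr 1
  funext acc lst
  simp only []
  have hstep : ∀ (w : Int),
      (PySem.List.enumerate (PySem.List.slice lst (some 0) (some (w + 1))) 0).foldl
        (fun cur iw =>
          if d.contains iw.2 then
            PySem.List.pySetD cur iw.1 (((PySem.List.index? d iw.2).getD 0 : Nat) : Int)
          else cur)
        (PySem.List.slice lst (some 0) (some (w + 1)))
      = (PySem.List.slice lst (some 0) (some (w + 1))).map (pvTok d) := by
    intro w
    have := pvTokA_eq d (PySem.List.slice lst (some 0) (some (w + 1))) []
    simpa using this
  calc (PySem.List.pyRange 1 (lst.length : Int) 1).foldl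
        (fun acc w => acc ++ [(PySem.List.enumerate (PySem.List.slice lst (some 0) (some (w + 1))) 0).foldl
          (fun cur iw =>
            if d.contains iw.2 then
              PySem.List.pySetD cur iw.1 (((PySem.List.index? d iw.2).getD 0 : Nat) : Int)
            else cur)
          (PySem.List.slice lst (some 0) (some (w + 1)))]) acc
      = acc ++ (PySem.List.pyRange 1 (lst.length : Int) 1).map
          (fun w => (PySem.List.enumerate (PySem.List.slice lst (some 0) (some (w + 1))) 0).foldl
            (fun cur iw =>
              if d.contains iw.2 then
                PySem.List.pySetD cur iw.1 (((PySem.List.index? d iw.2).getD 0 : Nat) : Int)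
              else cur)
            (PySem.List.slice lst (some 0) (some (w + 1)))) :=
        PySem.List.foldl_append_singleton_eq_map _ _ _
    _ = acc ++ pvContrib (pvTok d) lst := by
        rw [List.map_congr_left (fun w _ => hstep w), pvA_contrib]

-- B equals the canonical fold.
lemma pvB_eq (d : List Int) (card_list : List (List Int)) :
    token_sequence_list_alt d card_list
    = card_list.foldl (fun acc lst => acc ++ pvContrib (pvTok d) lst) [] := by
  unfold token_sequence_list_alt
  simp only []
  congr 1
  funext acc lst
  have h := pvBfold
    (fun word => ((PySem.List.enumerate d 0).foldl
      (fun m iw => if m.contains iw.2 = false then m.insert iw.2 iw.1 else m)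
      PySem.Dict.empty).getD word word) lst [] acc
  have h2 := congrArg Prod.snd h
  simp only [] at h2
  rw [h2, pvGather_nil]
  rw [pvContrib_congr _ (pvTok d) lst (fun w _ => pvPos_tok d w)]

-- ===== VERDICT (by name: the statement is the Claim_ definition above) =====
theorem token_sequence_list_spec : Claim_equal_token_sequence_list := by
  intro d card_list _
  unfold Spec_token_sequence_list
  rw [pvA_eq, pvB_eq]
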